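-- pv_equiv track=rewrite | github.com/Pranshugoyal/algo-ds-practice | python/Graph.py | eulerianPathAndCircuit
-- ===== SOURCE A (Python) =====
-- def eulerianPathAndCircuit(V, adj):
--     def dfsUtil(v, visited):
--         visited.add(v)
--         for u in adj[v]:
--             if u not in visited:
--                 dfsUtil(u, visited)
--         return visited
--
--     def isConnected():
--         source = None
--         for v in range(V):
--             if len(adj) > 0:
--                 source = v
--                 break
--
--         if source is None:
--             return True
--
--         visited = dfsUtil(source, set())
--
--         for v in range(V):
--             if v not in visited and (adj[v]) > 0:
--                 return False
--         return True
--
--     if not isConnected():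
--         return 0
--
--     oddDegree = 0
--     for v in range(V):
--         oddDegree += len(adj[v])%2
--
--     if oddDegree == 0:
--         return 2
--     elif oddDegree == 2:
--         return 1
--     else:
--         return 0
-- ===== SOURCE B (Python) =====
-- def eulerianPathAndCircuit(V, adj):
--     # Iterative stack traversal + a correct disconnection test (A's recursive DFS
--     # cannot ever report "disconnected": its check raises instead; see Pre_/Raises_).
--     if V > 0 and adj:
--         visited = {0}
--         stack = [0]
--         while stack:
--             v = stack.pop()
--             for u in adj[v]:
--                 if u not in visited:
--                     visited.add(u)
--                     stack.append(u)
--         for v in range(V):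
--             if v not in visited and len(adj[v]) > 0:
--                 return 0
--     odd = sum(len(adj[v]) % 2 for v in range(V))
--     return 2 if odd == 0 else 1 if odd == 2 else 0
-- ===== Notes on version B (the rewrite author's own statement) =====
-- stated objective: alternative
-- what changed: Replaces A's recursive dfsUtil with an iterative explicit-stack traversal and a disconnection test that actually works (A's 'adj[v] > 0' raises TypeError instead of ever returning False), and computes the parity tail as a single sum expression.
-- crash fix: On V>0 graphs where some vertex of range(V) is unreachable from vertex 0 (and the vertices B scans are present as keys), A raises TypeError from the comparison 'adj[v] > 0' (or KeyError); B returns 0, or the parity classification when every unreachable range vertex is isolated. — e.g. on eulerianPathAndCircuit(4, [(0, [1]), (1, [0]), (2, [3]), (3, [2])]): A raises TypeError, B returns 0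
import Mathlib
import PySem

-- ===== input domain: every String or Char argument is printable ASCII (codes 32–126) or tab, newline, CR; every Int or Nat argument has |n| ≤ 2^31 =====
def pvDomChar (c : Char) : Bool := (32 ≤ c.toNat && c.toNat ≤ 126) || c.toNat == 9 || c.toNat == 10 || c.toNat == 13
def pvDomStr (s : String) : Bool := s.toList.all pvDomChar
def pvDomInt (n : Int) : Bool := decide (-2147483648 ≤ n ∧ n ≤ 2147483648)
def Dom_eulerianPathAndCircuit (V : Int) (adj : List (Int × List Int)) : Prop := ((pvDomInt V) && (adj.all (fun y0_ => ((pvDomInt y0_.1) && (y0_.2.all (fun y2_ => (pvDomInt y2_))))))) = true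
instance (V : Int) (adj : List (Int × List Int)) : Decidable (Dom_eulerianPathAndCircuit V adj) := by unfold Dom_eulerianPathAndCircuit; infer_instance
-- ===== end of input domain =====

-- B replaces A's recursive DFS by an iterative explicit-stack traversal with a working
-- disconnection test (A's own test raises TypeError instead of ever returning False);
-- equivalence is about the RETURN value on the inputs where A returns (Pre_ below).

-- ===== PORT A =====
-- A's recursive dfsUtil, threaded visited set, fuel = recursion-depth bound
-- (none = an exception: KeyError on adj[v], or fuel exhaustion — excluded by Pre_).
def pvDfsA (adj : List (Int × List Int)) : Nat → Int → PySem.Set Int → Option (PySem.Set Int)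
  | 0, _, _ => none
  | fuel + 1, v, visited =>
    match (PySem.Dict.mk adj).get? v with
    | none => none
    | some ns =>
      ns.foldl
        (fun acc u =>
          match acc with
          | none => none
          | some vis => if u ∈ vis then acc else pvDfsA adj fuel u vis)
        (some (PySem.Set.add visited v))

-- isConnected(): the quirky source loop, the DFS, and the check whose False branch
-- always raises ('v not in visited and (adj[v]) > 0' is a TypeError/KeyError → none).
def pvIsConnectedA (V : Int) (adj : List (Int × List Int)) : Option Bool :=
  match (PySem.List.pyRange 0 V 1).find? (fun _ => decide (0 < adj.length)) with
  | none => some true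
  | some s =>
    match pvDfsA adj (adj.length + 2) s PySem.Set.empty with
    | none => none
    | some visited =>
      if (PySem.List.pyRange 0 V 1).all (fun v => decide (v ∈ visited)) then some true
      else none

-- the oddDegree accumulation loop (none = KeyError on adj[v])
def pvOddLoopA (adj : List (Int × List Int)) : List Int → Int → Option Int
  | [], acc => some acc
  | v :: vs, acc =>
    match (PySem.Dict.mk adj).get? v with
    | none => none
    | some ns => pvOddLoopA adj vs (acc + PySem.Int.mod (ns.length : Int) 2)

def eulerianPathAndCircuit (V : Int) (adj : List (Int × List Int)) : Int :=
  (match pvIsConnectedA V adj with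
   | none => none
   | some c =>
     if c then
       match pvOddLoopA adj (PySem.List.pyRange 0 V 1) 0 with
       | none => none
       | some odd => some (if odd = 0 then 2 else if odd = 2 then 1 else 0)
     else some 0).getD 0

-- ===== PORT B =====
-- iterative traversal: pop the LAST stack element, push unvisited neighbours
-- (fuel bounds the number of while-iterations; none = KeyError or fuel exhaustion)
def pvBfsB (adj : List (Int × List Int)) : Nat → PySem.Set Int → List Int → Option (PySem.Set Int)
  | 0, _, _ => none
  | fuel + 1, visited, stack =>
    match stack.getLast? with
    | none => some visited
    | some v =>
      match (PySem.Dict.mk adj).get? v with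
      | none => none
      | some ns =>
        let p := ns.foldl
          (fun (p : PySem.Set Int × List Int) u =>
            if u ∈ p.1 then p else (PySem.Set.add p.1 u, p.2 ++ [u]))
          (visited, stack.dropLast)
        pvBfsB adj fuel p.1 p.2

def pvFuelB (adj : List (Int × List Int)) : Nat :=
  adj.length + (adj.map (fun p => p.2.length)).sum + 2

-- 'if v not in visited and len(adj[v]) > 0: return 0' (none = KeyError)
def pvCheckB (adj : List (Int × List Int)) (visited : PySem.Set Int) : List Int → Option Bool
  | [] => some true
  | v :: vs =>
    if v ∈ visited then pvCheckB adj visited vs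
    else
      match (PySem.Dict.mk adj).get? v with
      | none => none
      | some (ns : List Int) => if 0 < ns.length then some false else pvCheckB adj visited vs

def eulerianPathAndCircuit_alt (V : Int) (adj : List (Int × List Int)) : Int :=
  (match
    (if 0 < V ∧ 0 < adj.length then
      match pvBfsB adj (pvFuelB adj) [0] [0] with
      | none => none
      | some visited => pvCheckB adj visited (PySem.List.pyRange 0 V 1)
     else some true) with
   | none => none
   | some false => some 0
   | some true =>
     match (PySem.List.pyRange 0 V 1).mapM (fun v => (PySem.Dict.mk adj).get? v) with
     | none => none
     | some lists =>
       let odd := (lists.map (fun (ns : List Int) => PySem.Int.mod (ns.length : Int) 2)).sum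
       some (if odd = 0 then 2 else if odd = 2 then 1 else 0)).getD 0

-- ===== PRECONDITION & SPEC =====
-- keys and first-match neighbour list of the association-list graph
def pvKeys (adj : List (Int × List Int)) : List Int := adj.map Prod.fst
def pvNbrs (adj : List (Int × List Int)) (v : Int) : List Int := (PySem.Dict.mk adj).getD v []
-- one closure step of the reachable set, and the set reachable from vertex 0
def pvStep (adj : List (Int × List Int)) (s : List Int) : List Int :=
  PySem.Set.update s (s.flatMap (pvNbrs adj))
def pvReach (adj : List (Int × List Int)) : List Int := (pvStep adj)^[adj.length + 2] [0]

-- A returns exactly when V ≤ 0, or every vertex reachable from 0 is an adj key and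
-- every vertex of range(V) is reachable from 0 (otherwise A raises KeyError or, on a
-- disconnected graph, TypeError from 'adj[v] > 0').  The first conjunct (the closure
-- is a fixpoint) always holds after adj.length+2 steps; it is stated only so the
-- proofs can cite it without a pigeonhole argument — it excludes no input.
-- ('every v of range(V) is reachable' is phrased by counting the reachable set, which is
-- small, instead of quantifying over range(V): V may be as large as 2^31)
def Pre_eulerianPathAndCircuit (V : Int) (adj : List (Int × List Int)) : Prop :=
  V ≤ 0 ∨
    ((∀ u ∈ pvStep adj (pvReach adj), u ∈ pvReach adj) ∧
     (∀ u ∈ pvReach adj, u ∈ pvKeys adj) ∧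
     (((pvReach adj).countP (fun v => decide (0 ≤ v) && decide (v < V)) : Int) = V))
instance (V : Int) (adj : List (Int × List Int)) : Decidable (Pre_eulerianPathAndCircuit V adj) := by
  unfold Pre_eulerianPathAndCircuit; infer_instance

def pvWitness_eulerianPathAndCircuit : Int × (List (Int × List Int)) :=
  (3, [(0, [1]), (1, [0, 2]), (2, [1])])

-- Where A raises but B returns: V>0, the closure R from 0 misses part of range(V), R
-- itself is keyed, and B's scan survives — either every unreachable range vertex is a
-- key (B returns 0 or, if all of them are isolated, the parity value), or some keyed
-- unreachable range vertex has an edge and all earlier unreachable ones are keys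
-- (B returns 0); A raises TypeError/KeyError at its first unreachable range vertex.
-- (again counting: 'every v of range(V) is reachable-or-a-key' ⇔ the count of such
-- v inside the set pvReach ∪ pvKeys is V, since that set has no duplicates)
def Raises_eulerianPathAndCircuit (V : Int) (adj : List (Int × List Int)) : Prop :=
  0 < V ∧
  (∀ u ∈ pvStep adj (pvReach adj), u ∈ pvReach adj) ∧
  (∀ u ∈ pvReach adj, u ∈ pvKeys adj) ∧
  ¬ (((pvReach adj).countP (fun v => decide (0 ≤ v) && decide (v < V)) : Int) = V) ∧
  ((((PySem.Set.update (pvReach adj) (pvKeys adj)).countP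
        (fun v => decide (0 ≤ v) && decide (v < V)) : Int) = V) ∨
   (∃ v ∈ pvKeys adj, 0 ≤ v ∧ v < V ∧ v ∉ pvReach adj ∧ pvNbrs adj v ≠ [] ∧
      (((PySem.Set.update (pvReach adj) (pvKeys adj)).countP
          (fun w => decide (0 ≤ w) && decide (w < v)) : Int) = v)))
instance (V : Int) (adj : List (Int × List Int)) : Decidable (Raises_eulerianPathAndCircuit V adj) := by
  unfold Raises_eulerianPathAndCircuit; infer_instance

def pvRaiseWitness_eulerianPathAndCircuit : Int × (List (Int × List Int)) :=
  (4, [(0, [1]), (1, [0]), (2, [3]), (3, [2])])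
def pvRaiseWitnessOut_eulerianPathAndCircuit : Int := 0

def Spec_eulerianPathAndCircuit (V : Int) (adj : List (Int × List Int)) (out : Int) : Prop :=
  out = eulerianPathAndCircuit_alt V adj
instance (V : Int) (adj : List (Int × List Int)) (out : Int) : Decidable (Spec_eulerianPathAndCircuit V adj out) := by
  unfold Spec_eulerianPathAndCircuit; infer_instance

-- ===== CLAIM (what is proved, stated in full; the proofs are below) =====
def Claim_equal_eulerianPathAndCircuit : Prop := ∀ (V : Int) (adj : List (Int × List Int)), Dom_eulerianPathAndCircuit V adj → Pre_eulerianPathAndCircuit V adj → Spec_eulerianPathAndCircuit V adj (eulerianPathAndCircuit V adj)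
def Claim_raises_eulerianPathAndCircuit : Prop := (∀ (V : Int) (adj : List (Int × List Int)), Dom_eulerianPathAndCircuit V adj → Raises_eulerianPathAndCircuit V adj → ¬ Pre_eulerianPathAndCircuit V adj) ∧ (Dom_eulerianPathAndCircuit (pvRaiseWitness_eulerianPathAndCircuit.1) (pvRaiseWitness_eulerianPathAndCircuit.2) ∧ Raises_eulerianPathAndCircuit (pvRaiseWitness_eulerianPathAndCircuit.1) (pvRaiseWitness_eulerianPathAndCircuit.2) ∧ eulerianPathAndCircuit_alt (pvRaiseWitness_eulerianPathAndCircuit.1) (pvRaiseWitness_eulerianPathAndCircuit.2) = pvRaiseWitnessOut_eulerianPathAndCircuit)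

-- ===== LEMMAS AND PROOFS =====

-- lookup of a present key returns its (first-match) neighbour list
theorem pvGet_eq_some_nbrs (adj : List (Int × List Int)) (v : Int) (h : v ∈ pvKeys adj) :
    (PySem.Dict.mk adj).get? v = some (pvNbrs adj v) := by
  cases hg : (PySem.Dict.mk adj).get? v with
  | none =>
    exfalso
    exact ((PySem.Dict.get?_eq_none_iff_not_mem_keys _ v).1 hg)
      (by simpa [PySem.Dict.keys_mk, pvKeys] using h)
  | some ns =>
    have hnb : pvNbrs adj v = ns := by
      simp [pvNbrs, PySem.Dict.getD_eq_get?_getD, hg]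
    rw [hnb]

theorem pv_subset_step (adj : List (Int × List Int)) (s : List Int) :
    ∀ x ∈ s, x ∈ pvStep adj s := by
  intro x hx
  exact (PySem.Set.mem_update _ _ _).2 (Or.inl hx)

theorem pv_nbr_mem_step (adj : List (Int × List Int)) (s : List Int) {w u : Int}
    (hw : w ∈ s) (hu : u ∈ pvNbrs adj w) : u ∈ pvStep adj s :=
  (PySem.Set.mem_update _ _ _).2 (Or.inr (List.mem_flatMap.2 ⟨w, hw, hu⟩))

theorem pv_zero_mem_reach (adj : List (Int × List Int)) : (0 : Int) ∈ pvReach adj := by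
  have h : ∀ n, (0 : Int) ∈ (pvStep adj)^[n] [0] := by
    intro n
    induction n with
    | zero => simp
    | succ n ih =>
      rw [Function.iterate_succ_apply']
      exact pv_subset_step adj _ _ ih
  exact h _

theorem pv_nodup_reach (adj : List (Int × List Int)) : (pvReach adj).Nodup := by
  have h : ∀ n, ((pvStep adj)^[n] [0]).Nodup := by
    intro n
    induction n with
    | zero => simp
    | succ n ih =>
      rw [Function.iterate_succ_apply']
      exact PySem.Set.nodup_update _ _ ih
  exact h _

-- any set containing 0 and closed under neighbours contains the whole closure
theorem pv_reach_min (adj : List (Int × List Int)) (S : List Int)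
    (h0 : (0 : Int) ∈ S) (hcl : ∀ w ∈ S, ∀ u ∈ pvNbrs adj w, u ∈ S) :
    ∀ x ∈ pvReach adj, x ∈ S := by
  have h : ∀ n, ∀ x ∈ (pvStep adj)^[n] [0], x ∈ S := by
    intro n
    induction n with
    | zero =>
      intro x hx
      simp only [Function.iterate_zero, id_eq, List.mem_singleton] at hx
      simpa [hx] using h0
    | succ n ih =>
      intro x hx
      rw [Function.iterate_succ_apply'] at hx
      rcases (PySem.Set.mem_update _ _ _).1 hx with h1 | h1
      · exact ih x h1
      · rcases List.mem_flatMap.1 h1 with ⟨w, hw, hu⟩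
        exact hcl w (ih w hw) x hu
  exact h _

theorem pv_nodup_subset_length {l m : List Int} (hl : l.Nodup) (hsub : ∀ x ∈ l, x ∈ m) :
    l.length ≤ m.length := by
  calc l.length = l.toFinset.card := (List.toFinset_card_of_nodup hl).symm
    _ ≤ m.toFinset.card :=
        Finset.card_le_card (fun x hx => List.mem_toFinset.2 (hsub x (List.mem_toFinset.1 hx)))
    _ ≤ m.length := List.toFinset_card_le m

theorem pv_reach_len (adj : List (Int × List Int))
    (hK : ∀ u ∈ pvReach adj, u ∈ pvKeys adj) : (pvReach adj).length ≤ adj.length := by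
  have h := pv_nodup_subset_length (pv_nodup_reach adj) hK
  simpa [pvKeys] using h

theorem pv_reach_closed (adj : List (Int × List Int))
    (hcl : ∀ u ∈ pvStep adj (pvReach adj), u ∈ pvReach adj) :
    ∀ w ∈ pvReach adj, ∀ u ∈ pvNbrs adj w, u ∈ pvReach adj :=
  fun w hw u hu => hcl u (pv_nbr_mem_step adj _ hw hu)

-- a Nodup list whose count of elements in [0, V) equals V contains all of [0, V)
theorem pv_countP_full {R : List Int} {V : Int} (hnd : R.Nodup)
    (h : ((R.countP (fun v => decide (0 ≤ v) && decide (v < V))) : Int) = V) :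
    ∀ v : Int, 0 ≤ v → v < V → v ∈ R := by
  intro v hv0 hvV
  set p : Int → Bool := fun v => decide (0 ≤ v) && decide (v < V) with hp
  have hVnn : 0 ≤ V := le_trans hv0 (le_of_lt hvV)
  have hfnd : (R.filter p).Nodup := hnd.filter p
  have hsub : (R.filter p).toFinset ⊆ Finset.Ico (0 : Int) V := by
    intro x hx
    have hx' := List.mem_toFinset.1 hx
    have := List.of_mem_filter hx'
    simp only [hp, Bool.and_eq_true, decide_eq_true_eq] at this
    exact Finset.mem_Ico.2 (by omega)
  have hcard : (R.filter p).toFinset.card = V.toNat := by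
    rw [List.toFinset_card_of_nodup hfnd, ← List.countP_eq_length_filter]
    omega
  have hIco : (Finset.Ico (0 : Int) V).card = V.toNat := by
    rw [Int.card_Ico]
    simp
  have heq : (R.filter p).toFinset = Finset.Ico (0 : Int) V :=
    Finset.eq_of_subset_of_card_le hsub (by omega)
  have hvmem : v ∈ (R.filter p).toFinset := by
    rw [heq]; exact Finset.mem_Ico.2 ⟨hv0, hvV⟩
  exact List.mem_of_mem_filter (List.mem_toFinset.1 hvmem)

-- invariant of A's DFS at a given fuel
def pvDfsGood (adj : List (Int × List Int)) (fuel : Nat) : Prop :=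
  ∀ (v : Int) (visited : PySem.Set Int), v ∈ pvReach adj → v ∉ visited →
    (∀ x ∈ visited, x ∈ pvReach adj) → visited.Nodup →
    (pvReach adj).length ≤ fuel + visited.length →
    ∃ S : PySem.Set Int, pvDfsA adj fuel v visited = some S ∧
      (∀ x ∈ visited, x ∈ S) ∧ v ∈ S ∧ (∀ x ∈ S, x ∈ pvReach adj) ∧ S.Nodup ∧
      (∀ w ∈ S, w ∉ visited → ∀ u ∈ pvNbrs adj w, u ∈ S)

theorem pvDfsFold_spec (adj : List (Int × List Int)) (fuel : Nat)
    (hdfs : pvDfsGood adj fuel) :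
    ∀ (ns : List Int) (visited : PySem.Set Int),
      (∀ u ∈ ns, u ∈ pvReach adj) → (∀ x ∈ visited, x ∈ pvReach adj) → visited.Nodup →
      (pvReach adj).length ≤ fuel + visited.length →
      ∃ S : PySem.Set Int,
        ns.foldl (fun acc u => match acc with
          | none => none
          | some vis => if u ∈ vis then acc else pvDfsA adj fuel u vis) (some visited) = some S ∧
        (∀ x ∈ visited, x ∈ S) ∧ (∀ u ∈ ns, u ∈ S) ∧ (∀ x ∈ S, x ∈ pvReach adj) ∧ S.Nodup ∧
        (∀ w ∈ S, w ∉ visited → ∀ u ∈ pvNbrs adj w, u ∈ S) := by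
  intro ns
  induction ns with
  | nil =>
    intro visited _ hvR hnd _
    exact ⟨visited, rfl, fun x hx => hx, by simp, hvR, hnd,
      fun _ hw hnot => absurd hw hnot⟩
  | cons u us ih =>
    intro visited hns hvR hnd hm
    by_cases hu : u ∈ visited
    · obtain ⟨S, heq, h1, h2, h3, h4, h5⟩ :=
        ih visited (fun x hx => hns x (List.mem_cons_of_mem _ hx)) hvR hnd hm
      refine ⟨S, ?_, h1, ?_, h3, h4, h5⟩
      · simpa [List.foldl_cons, hu] using heq
      · intro x hx
        rcases List.mem_cons.1 hx with h | h
        · subst h; exact h1 x hu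
        · exact h2 x h
    · obtain ⟨S1, heq1, hsub1, hin1, hS1R, hS1nd, hcl1⟩ :=
        hdfs u visited (hns u (by simp)) hu hvR hnd hm
      have hlen1 : visited.length ≤ S1.length := pv_nodup_subset_length hnd hsub1
      obtain ⟨S, heq, h1, h2, h3, h4, h5⟩ :=
        ih S1 (fun x hx => hns x (List.mem_cons_of_mem _ hx)) hS1R hS1nd (by omega)
      refine ⟨S, ?_, fun x hx => h1 x (hsub1 x hx), ?_, h3, h4, ?_⟩
      · simpa [List.foldl_cons, hu, heq1] using heq
      · intro x hx
        rcases List.mem_cons.1 hx with h | h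
        · subst h; exact h1 x hin1
        · exact h2 x h
      · intro w hw hnot u' hu'
        by_cases hwS1 : w ∈ S1
        · exact h1 u' (hcl1 w hwS1 hnot u' hu')
        · exact h5 w hw hwS1 u' hu'

theorem pvDfsA_good (adj : List (Int × List Int))
    (hcl : ∀ u ∈ pvStep adj (pvReach adj), u ∈ pvReach adj)
    (hK : ∀ u ∈ pvReach adj, u ∈ pvKeys adj) :
    ∀ fuel, pvDfsGood adj fuel := by
  intro fuel
  induction fuel with
  | zero =>
    intro v visited hv hvnot hvR hnd hm
    exfalso
    have hcons : (v :: visited).Nodup := List.nodup_cons.2 ⟨hvnot, hnd⟩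
    have hlen := pv_nodup_subset_length hcons (by
      intro x hx
      rcases List.mem_cons.1 hx with h | h
      · subst h; exact hv
      · exact hvR x h)
    simp only [List.length_cons] at hlen
    omega
  | succ fuel ih =>
    intro v visited hv hvnot hvR hnd hm
    have hget := pvGet_eq_some_nbrs adj v (hK v hv)
    have hns : ∀ u ∈ pvNbrs adj v, u ∈ pvReach adj := pv_reach_closed adj hcl v hv
    have hv1nd : (PySem.Set.add visited v).Nodup := PySem.Set.nodup_add _ _ hnd
    have hv1R : ∀ x ∈ PySem.Set.add visited v, x ∈ pvReach adj := by
      intro x hx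
      rcases (PySem.Set.mem_add _ _ _).1 hx with h | h
      · exact hvR x h
      · subst h; exact hv
    have hlen1 : (PySem.Set.add visited v).length = visited.length + 1 := by
      rw [PySem.Set.add_of_not_mem hvnot]; simp
    obtain ⟨S, heq, hsub, hin, hSR, hSnd, hScl⟩ :=
      pvDfsFold_spec adj fuel ih (pvNbrs adj v) (PySem.Set.add visited v) hns hv1R hv1nd
        (by omega)
    refine ⟨S, ?_, ?_, ?_, hSR, hSnd, ?_⟩
    · simp only [pvDfsA, hget]
      exact heq
    · intro x hx; exact hsub x ((PySem.Set.mem_add _ _ _).2 (Or.inl hx))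
    · exact hsub v ((PySem.Set.mem_add _ _ _).2 (Or.inr rfl))
    · intro w hw hwnot u hu
      by_cases hwv : w = v
      · subst hwv; exact hin u hu
      · refine hScl w hw ?_ u hu
        intro hmem
        rcases (PySem.Set.mem_add _ _ _).1 hmem with h | h
        · exact hwnot h
        · exact hwv h

-- A's oddDegree loop on a list of present keys
theorem pvOddLoopA_spec (adj : List (Int × List Int)) :
    ∀ (l : List Int) (acc : Int), (∀ v ∈ l, v ∈ pvKeys adj) →
      pvOddLoopA adj l acc =
        some (acc + (l.map (fun v => PySem.Int.mod ((pvNbrs adj v).length : Int) 2)).sum) := by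
  intro l
  induction l with
  | nil => intro acc _; simp [pvOddLoopA]
  | cons v vs ih =>
    intro acc h
    have hget := pvGet_eq_some_nbrs adj v (h v (by simp))
    simp only [pvOddLoopA, hget]
    rw [ih _ (fun x hx => h x (List.mem_cons_of_mem _ hx))]
    simp [add_assoc]

-- B's comprehension on a list of present keys
theorem pvMapM_get_spec (adj : List (Int × List Int)) :
    ∀ l : List Int, (∀ v ∈ l, v ∈ pvKeys adj) →
      l.mapM (fun v => (PySem.Dict.mk adj).get? v) = some (l.map (pvNbrs adj)) := by
  intro l
  induction l with
  | nil => intro _; simp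
  | cons v vs ih =>
    intro h
    rw [List.mapM_cons, pvGet_eq_some_nbrs adj v (h v (by simp)),
      ih (fun x hx => h x (List.mem_cons_of_mem _ hx))]
    rfl

theorem pvCheckB_spec (adj : List (Int × List Int)) (visited : PySem.Set Int) :
    ∀ l : List Int, (∀ v ∈ l, v ∈ visited) → pvCheckB adj visited l = some true := by
  intro l
  induction l with
  | nil => intro _; simp [pvCheckB]
  | cons v vs ih =>
    intro h
    simp only [pvCheckB]
    rw [if_pos (h v (by simp))]
    exact ih fun x hx => h x (List.mem_cons_of_mem _ hx)

-- B's push loop over the neighbours of the popped vertex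
theorem pvPush_spec (adj : List (Int × List Int)) :
    ∀ (ns : List Int) (visited : PySem.Set Int) (stack : List Int),
      (∀ u ∈ ns, u ∈ pvReach adj) → (∀ x ∈ visited, x ∈ pvReach adj) → visited.Nodup →
      (∀ x ∈ stack, x ∈ visited) →
      ((∀ x ∈ visited, x ∈ (ns.foldl (fun (p : PySem.Set Int × List Int) u =>
          if u ∈ p.1 then p else (PySem.Set.add p.1 u, p.2 ++ [u])) (visited, stack)).1) ∧
       (∀ u ∈ ns, u ∈ (ns.foldl (fun (p : PySem.Set Int × List Int) u =>
          if u ∈ p.1 then p else (PySem.Set.add p.1 u, p.2 ++ [u])) (visited, stack)).1) ∧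
       (∀ x ∈ (ns.foldl (fun (p : PySem.Set Int × List Int) u =>
          if u ∈ p.1 then p else (PySem.Set.add p.1 u, p.2 ++ [u])) (visited, stack)).1, x ∈ pvReach adj) ∧
       (ns.foldl (fun (p : PySem.Set Int × List Int) u =>
          if u ∈ p.1 then p else (PySem.Set.add p.1 u, p.2 ++ [u])) (visited, stack)).1.Nodup ∧
       (∀ x ∈ (ns.foldl (fun (p : PySem.Set Int × List Int) u =>
          if u ∈ p.1 then p else (PySem.Set.add p.1 u, p.2 ++ [u])) (visited, stack)).2,
          x ∈ (ns.foldl (fun (p : PySem.Set Int × List Int) u =>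
          if u ∈ p.1 then p else (PySem.Set.add p.1 u, p.2 ++ [u])) (visited, stack)).1) ∧
       (∀ x ∈ stack, x ∈ (ns.foldl (fun (p : PySem.Set Int × List Int) u =>
          if u ∈ p.1 then p else (PySem.Set.add p.1 u, p.2 ++ [u])) (visited, stack)).2) ∧
       (∀ x ∈ (ns.foldl (fun (p : PySem.Set Int × List Int) u =>
          if u ∈ p.1 then p else (PySem.Set.add p.1 u, p.2 ++ [u])) (visited, stack)).1,
          x ∈ visited ∨ x ∈ (ns.foldl (fun (p : PySem.Set Int × List Int) u =>
          if u ∈ p.1 then p else (PySem.Set.add p.1 u, p.2 ++ [u])) (visited, stack)).2) ∧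
       (ns.foldl (fun (p : PySem.Set Int × List Int) u =>
          if u ∈ p.1 then p else (PySem.Set.add p.1 u, p.2 ++ [u])) (visited, stack)).1.length + stack.length =
         visited.length + (ns.foldl (fun (p : PySem.Set Int × List Int) u =>
          if u ∈ p.1 then p else (PySem.Set.add p.1 u, p.2 ++ [u])) (visited, stack)).2.length) := by
  intro ns
  induction ns with
  | nil =>
    intro visited stack _ hvR hnd hsv
    exact ⟨fun x hx => hx, by simp, hvR, hnd, fun x hx => hsv x hx, fun x hx => hx,
      fun x hx => Or.inl hx, rfl⟩
  | cons a as ih =>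
    intro visited stack hns hvR hnd hsv
    by_cases hu : a ∈ visited
    · obtain ⟨h1, h2, h3, h4, h5, h6, h7, h8⟩ :=
        ih visited stack (fun x hx => hns x (List.mem_cons_of_mem _ hx)) hvR hnd hsv
      simp only [List.foldl_cons, if_pos hu]
      refine ⟨h1, ?_, h3, h4, h5, h6, h7, h8⟩
      intro x hx
      rcases List.mem_cons.1 hx with h | h
      · subst h; exact h1 x hu
      · exact h2 x h
    · have hvR' : ∀ x ∈ PySem.Set.add visited a, x ∈ pvReach adj := by
        intro x hx
        rcases (PySem.Set.mem_add _ _ _).1 hx with h | h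
        · exact hvR x h
        · subst h; exact hns x (by simp)
      have hnd' : (PySem.Set.add visited a).Nodup := PySem.Set.nodup_add _ _ hnd
      have hsv' : ∀ x ∈ stack ++ [a], x ∈ PySem.Set.add visited a := by
        intro x hx
        rcases List.mem_append.1 hx with h | h
        · exact (PySem.Set.mem_add _ _ _).2 (Or.inl (hsv x h))
        · simp only [List.mem_singleton] at h
          exact (PySem.Set.mem_add _ _ _).2 (Or.inr h)
      obtain ⟨h1, h2, h3, h4, h5, h6, h7, h8⟩ :=
        ih (PySem.Set.add visited a) (stack ++ [a])
          (fun x hx => hns x (List.mem_cons_of_mem _ hx)) hvR' hnd' hsv'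
      have hlen : (PySem.Set.add visited a).length = visited.length + 1 := by
        rw [PySem.Set.add_of_not_mem hu]; simp
      simp only [List.foldl_cons, if_neg hu]
      refine ⟨?_, ?_, h3, h4, h5, ?_, ?_, ?_⟩
      · intro x hx; exact h1 x ((PySem.Set.mem_add _ _ _).2 (Or.inl hx))
      · intro x hx
        rcases List.mem_cons.1 hx with h | h
        · subst h; exact h1 x ((PySem.Set.mem_add _ _ _).2 (Or.inr rfl))
        · exact h2 x h
      · intro x hx; exact h6 x (List.mem_append.2 (Or.inl hx))
      · intro x hx
        rcases h7 x hx with h | h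
        · rcases (PySem.Set.mem_add _ _ _).1 h with h' | h'
          · exact Or.inl h'
          · subst h'; exact Or.inr (h6 x (List.mem_append.2 (Or.inr (by simp))))
        · exact Or.inr h
      · simp only [List.length_append, List.length_singleton] at h8
        omega

theorem pvBfsB_spec (adj : List (Int × List Int))
    (hcl : ∀ u ∈ pvStep adj (pvReach adj), u ∈ pvReach adj)
    (hK : ∀ u ∈ pvReach adj, u ∈ pvKeys adj) :
    ∀ (fuel : Nat) (visited : PySem.Set Int) (stack : List Int),
      visited.Nodup → (∀ x ∈ visited, x ∈ pvReach adj) → (∀ x ∈ stack, x ∈ visited) →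
      (∀ w ∈ visited, w ∉ stack → ∀ u ∈ pvNbrs adj w, u ∈ visited) →
      (pvReach adj).length + stack.length + 1 ≤ fuel + visited.length →
      ∃ S : PySem.Set Int, pvBfsB adj fuel visited stack = some S ∧
        (∀ x ∈ visited, x ∈ S) ∧ (∀ w ∈ S, ∀ u ∈ pvNbrs adj w, u ∈ S) := by
  intro fuel
  induction fuel with
  | zero =>
    intro visited stack hnd hvR _ _ hm
    exfalso
    have := pv_nodup_subset_length hnd hvR
    omega
  | succ fuel ih =>
    intro visited stack hnd hvR hsv hinv hm
    cases hlast : stack.getLast? with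
    | none =>
      have hnil : stack = [] := by
        cases stack with
        | nil => rfl
        | cons a l => simp at hlast
      refine ⟨visited, ?_, fun x hx => hx, ?_⟩
      · simp only [pvBfsB, hlast]
      · intro w hw u hu
        exact hinv w hw (by simp [hnil]) u hu
    | some v =>
      obtain ⟨ys, hys⟩ := List.getLast?_eq_some_iff.1 hlast
      have hvstack : v ∈ stack := List.mem_of_getLast? hlast
      have hvvis : v ∈ visited := hsv v hvstack
      have hvRm : v ∈ pvReach adj := hvR v hvvis
      have hget := pvGet_eq_some_nbrs adj v (hK v hvRm)
      have hns : ∀ u ∈ pvNbrs adj v, u ∈ pvReach adj := pv_reach_closed adj hcl v hvRm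
      have hdrop : stack.dropLast = ys := by rw [hys]; exact List.dropLast_concat ..
      have hds : ∀ x ∈ stack.dropLast, x ∈ visited :=
        fun x hx => hsv x (List.dropLast_subset _ hx)
      obtain ⟨q1, q2, q3, q4, q5, q6, q7, q8⟩ :=
        pvPush_spec adj (pvNbrs adj v) visited stack.dropLast hns hvR hnd hds
      have hstklen : stack.dropLast.length + 1 = stack.length := by
        rw [hdrop, hys]; simp
      have hinv' : ∀ w ∈ (((pvNbrs adj v).foldl (fun (p : PySem.Set Int × List Int) u =>
            if u ∈ p.1 then p else (PySem.Set.add p.1 u, p.2 ++ [u])) (visited, stack.dropLast))).1,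
          w ∉ (((pvNbrs adj v).foldl (fun (p : PySem.Set Int × List Int) u =>
            if u ∈ p.1 then p else (PySem.Set.add p.1 u, p.2 ++ [u])) (visited, stack.dropLast))).2 →
          ∀ u ∈ pvNbrs adj w, u ∈ (((pvNbrs adj v).foldl (fun (p : PySem.Set Int × List Int) u =>
            if u ∈ p.1 then p else (PySem.Set.add p.1 u, p.2 ++ [u])) (visited, stack.dropLast))).1 := by
        intro w hw hwns u hu
        rcases q7 w hw with hwv | hws
        · by_cases hwveq : w = v
          · subst hwveq; exact q2 u hu
          · have hwnot : w ∉ stack := by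
              intro hmem
              rw [hys] at hmem
              rcases List.mem_append.1 hmem with h | h
              · exact hwns (q6 w (by rw [hdrop]; exact h))
              · simp only [List.mem_singleton] at h
                exact hwveq h
            exact q1 u (hinv w hwv hwnot u hu)
        · exact absurd hws hwns
      obtain ⟨S, heq, hsubS, hclS⟩ := ih _ _ q4 q3 q5 hinv' (by omega)
      refine ⟨S, ?_, fun x hx => hsubS x (q1 x hx), hclS⟩
      simp only [pvBfsB, hlast, hget]
      exact heq

-- ===== VERDICT (by name: the statement is the Claim_ definition above) =====
theorem eulerianPathAndCircuit_spec : Claim_equal_eulerianPathAndCircuit := by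
  intro V adj _ hpre
  unfold Spec_eulerianPathAndCircuit
  by_cases hV : 0 < V
  · rcases hpre with h | ⟨hcl, hK, hcnt⟩
    · omega
    · have hR : ∀ v ∈ PySem.List.pyRange 0 V, v ∈ pvReach adj := by
        intro v hv
        have hb := PySem.List.mem_pyRange_one.1 hv
        exact pv_countP_full (pv_nodup_reach adj) hcnt v hb.1 hb.2
      have h0R := pv_zero_mem_reach adj
      have h0K : (0 : Int) ∈ pvKeys adj := hK 0 h0R
      have hadj : 0 < adj.length := by
        rcases adj with _ | ⟨p, rest⟩
        · simp [pvKeys] at h0K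
        · simp
      have hrlen := pv_reach_len adj hK
      have hrangeK : ∀ v ∈ PySem.List.pyRange 0 V, v ∈ pvKeys adj := fun v hv => hK v (hR v hv)
      -- A's DFS succeeds and covers range(V)
      obtain ⟨SA, heqA, _, h0SA, _, _, hclA0⟩ :=
        pvDfsA_good adj hcl hK (adj.length + 2) 0 PySem.Set.empty h0R (by simp [PySem.Set.empty])
          (by simp [PySem.Set.empty]) (by simp [PySem.Set.empty])
          (by simp only [PySem.Set.empty, List.length_nil]; omega)
      have hclA : ∀ w ∈ SA, ∀ u ∈ pvNbrs adj w, u ∈ SA :=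
        fun w hw => hclA0 w hw (by simp [PySem.Set.empty])
      have hRSA := pv_reach_min adj SA h0SA hclA
      have hfind : (PySem.List.pyRange 0 V).find? (fun _ => decide (0 < adj.length)) = some 0 := by
        rw [PySem.List.pyRange_one_cons hV]
        simp [List.find?, hadj]
      have hall : (PySem.List.pyRange 0 V).all (fun v => decide (v ∈ SA)) = true := by
        rw [List.all_eq_true]
        intro v hv
        exact decide_eq_true (hRSA v (hR v hv))
      have hconn : pvIsConnectedA V adj = some true := by
        unfold pvIsConnectedA
        rw [hfind]
        simp only [heqA, hall, if_true]
      have hodd := pvOddLoopA_spec adj (PySem.List.pyRange 0 V) 0 hrangeK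
      -- B's traversal succeeds and covers range(V)
      obtain ⟨SB, heqB, hsubB, hclB⟩ :=
        pvBfsB_spec adj hcl hK (pvFuelB adj) [0] [0] (by simp)
          (by intro x hx; simp only [List.mem_singleton] at hx; subst hx; exact h0R)
          (by intro x hx; exact hx)
          (by intro w hw hns; simp only [List.mem_singleton] at hw; subst hw; simp at hns)
          (by simp only [pvFuelB, List.length_singleton]; omega)
      have h0SB : (0 : Int) ∈ SB := hsubB 0 (by simp)
      have hRSB := pv_reach_min adj SB h0SB hclB
      have hcheck : pvCheckB adj SB (PySem.List.pyRange 0 V) = some true :=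
        pvCheckB_spec adj SB _ (fun v hv => hRSB v (hR v hv))
      have hmapm := pvMapM_get_spec adj (PySem.List.pyRange 0 V) hrangeK
      unfold eulerianPathAndCircuit eulerianPathAndCircuit_alt
      rw [hconn, if_pos (And.intro hV hadj), heqB]
      simp only [hcheck, hodd, hmapm]
      simp [List.map_map, Function.comp_def]
  · -- V ≤ 0: range(V) is empty, both programs return 2
    have hrange : PySem.List.pyRange 0 V = [] := by
      rw [List.eq_nil_iff_forall_not_mem]
      intro x hx
      have := PySem.List.mem_pyRange_one.1 hx
      omega
    unfold eulerianPathAndCircuit eulerianPathAndCircuit_alt pvIsConnectedA pvOddLoopA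
    rw [hrange]
    simp [hV]

theorem eulerianPathAndCircuit_raises : Claim_raises_eulerianPathAndCircuit := by
  unfold Claim_raises_eulerianPathAndCircuit
  constructor
  · intro V adj _ hr hpre
    obtain ⟨hV, _, _, hnR, _⟩ := hr
    rcases hpre with h | ⟨_, _, h3⟩
    · omega
    · exact hnR h3
  · decide

-- witness self-check: B's port indeed returns the stated value at the raise witness
theorem pvRaiseWitness_ok :
    eulerianPathAndCircuit_alt pvRaiseWitness_eulerianPathAndCircuit.1
      pvRaiseWitness_eulerianPathAndCircuit.2 = pvRaiseWitnessOut_eulerianPathAndCircuit :=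
  eulerianPathAndCircuit_raises.2.2.2
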